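-- pv_equiv track=rewrite | github.com/pa-nuzz/thinkbetter | backend/app/services/prompts.py | needs_clarification
-- ===== SOURCE A (Python) =====
-- from typing import Dict, List, Optional, Any
--
-- def needs_clarification(input_text: str, mode: str) -> tuple[bool, List[str]]:
--     """
--     Determine if input needs clarification and suggest intelligent questions.
--
--     Args:
--         input_text: User's input text
--         mode: Generation mode
--
--     Returns:
--         Tuple of (needs_clarification, suggested_questions)
--     """
--     if not input_text or len(input_text.strip()) < 8:
--         return True, ["Could you provide more context about your request? I'd like to understand your objectives and constraints better."]
--
--     # Sophisticated analysis of input quality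
--     word_count = len(input_text.strip().split())
--     has_specifics = any(keyword in input_text.lower() for keyword in [
--         'specifically', 'exactly', 'precisely', 'particular', 'detailed',
--         'because', 'since', 'due to', 'according to', 'based on'
--     ])
--     has_questions = '?' in input_text or '?' in input_text.split()[-1]
--
--     # Mode-specific clarification logic
--     if mode == "idea":
--         vague_indicators = [
--             'idea', 'have an idea', 'thinking about', 'concept', 'maybe',
--             'considering', 'something like', 'kind of', 'sort of',
--             'help me', 'want to create', 'looking for', 'need help'
--         ]
--         if (any(indicator in input_text.lower() for indicator in vague_indicators) and
--             not has_specifics and word_count < 15):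
--             return True, [
--                 "What specific problem or opportunity are you addressing?",
--                 "Who is your target audience or market segment?",
--                 "What makes your approach unique or different from existing solutions?",
--                 "What are your immediate goals or success criteria?"
--             ]
--
--     elif mode == "script":
--         vague_indicators = [
--             'script', 'need a script', 'write something', 'presentation',
--             'talk about', 'discuss', 'cover', 'content', 'material'
--         ]
--         if (any(indicator in input_text.lower() for indicator in vague_indicators) and
--             not has_specifics and word_count < 20):
--             return True, [
--                 "What is the specific format or medium you need (video, podcast, presentation)?",
--                 "Who is your target audience and what do you want them to feel or think?",
--                 "What is the primary message or call to action?",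
--                 "What tone or style would be most effective for your purpose?"
--             ]
--
--     elif mode == "brainstorm":
--         vague_indicators = [
--             'brainstorm', 'ideas', 'think about', 'explore', 'generate',
--             'come up with', 'creative', 'innovation', 'solutions'
--         ]
--         if (any(indicator in input_text.lower() for indicator in vague_indicators) and
--             not has_specifics and word_count < 25):
--             return True, [
--                 "What specific domain or industry would you like to focus on?",
--                 "Are there any constraints, boundaries, or requirements we should consider?",
--                 "What is the ultimate goal or outcome you're hoping to achieve?",
--                 "Who are the key stakeholders or perspectives we should include?"
--             ]
--
--     elif mode == "prompt":
--         vague_indicators = [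
--             'prompt', 'improve', 'enhance', 'better', 'optimize',
--             'ai prompt', 'chatgpt', 'llm prompt'
--         ]
--         if (any(indicator in input_text.lower() for indicator in vague_indicators) and
--             not has_specifics and word_count < 30):
--             return True, [
--                 "What specific task or use case will this prompt serve?",
--                 "What AI model or type of response are you targeting?",
--                 "What context, constraints, or guidelines should be included?",
--                 "Who is the intended audience for these AI-generated responses?"
--             ]
--
--     return False, []
-- ===== SOURCE B (Python) =====
-- _SPECIFICS = [
--     'specifically', 'exactly', 'precisely', 'particular', 'detailed',
--     'because', 'since', 'due to', 'according to', 'based on'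
-- ]
--
-- _RULES = [
--     ("idea", [
--         'idea', 'have an idea', 'thinking about', 'concept', 'maybe',
--         'considering', 'something like', 'kind of', 'sort of',
--         'help me', 'want to create', 'looking for', 'need help'
--     ], 15, [
--         "What specific problem or opportunity are you addressing?",
--         "Who is your target audience or market segment?",
--         "What makes your approach unique or different from existing solutions?",
--         "What are your immediate goals or success criteria?"
--     ]),
--     ("script", [
--         'script', 'need a script', 'write something', 'presentation',
--         'talk about', 'discuss', 'cover', 'content', 'material'
--     ], 20, [
--         "What is the specific format or medium you need (video, podcast, presentation)?",
--         "Who is your target audience and what do you want them to feel or think?",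
--         "What is the primary message or call to action?",
--         "What tone or style would be most effective for your purpose?"
--     ]),
--     ("brainstorm", [
--         'brainstorm', 'ideas', 'think about', 'explore', 'generate',
--         'come up with', 'creative', 'innovation', 'solutions'
--     ], 25, [
--         "What specific domain or industry would you like to focus on?",
--         "Are there any constraints, boundaries, or requirements we should consider?",
--         "What is the ultimate goal or outcome you're hoping to achieve?",
--         "Who are the key stakeholders or perspectives we should include?"
--     ]),
--     ("prompt", [
--         'prompt', 'improve', 'enhance', 'better', 'optimize',
--         'ai prompt', 'chatgpt', 'llm prompt'
--     ], 30, [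
--         "What specific task or use case will this prompt serve?",
--         "What AI model or type of response are you targeting?",
--         "What context, constraints, or guidelines should be included?",
--         "Who is the intended audience for these AI-generated responses?"
--     ]),
-- ]
--
--
-- def needs_clarification(input_text: str, mode: str):
--     if not input_text or len(input_text.strip()) < 8:
--         return True, ["Could you provide more context about your request? I'd like to understand your objectives and constraints better."]
--     rule = None
--     for m, inds, thr, qs in _RULES:
--         if m == mode:
--             rule = (inds, thr, qs)
--             break
--     if rule is None:
--         return False, []
--     inds, thr, qs = rule
--     if len(input_text.strip().split()) >= thr:
--         return False, []
--     # Single left-to-right scan over the lowered text: at each position test which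
--     # keywords start there (naive multi-pattern matcher), early-exiting the moment
--     # a "specifics" keyword is seen, instead of one full substring scan per keyword.
--     lowered = input_text.lower()
--     found = False
--     for i in range(len(lowered)):
--         if any(lowered.startswith(k, i) for k in _SPECIFICS):
--             return False, []
--         if not found and any(lowered.startswith(k, i) for k in inds):
--             found = True
--     return (True, qs) if found else (False, [])
-- ===== Notes on version B (the rewrite author's own statement) =====
-- stated objective: alternative
-- what changed: B replaces A's per-keyword 'in' substring scans with a single left-to-right position scan of the lowered text that tests all keywords via startswith at each index (early-exiting on a specifics hit), restructures the four copy-pasted mode branches into a first-match rule search with staged early returns (unknown mode, then word-count threshold, before any text scanning), and drops the dead has_questions computation.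
import Mathlib
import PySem

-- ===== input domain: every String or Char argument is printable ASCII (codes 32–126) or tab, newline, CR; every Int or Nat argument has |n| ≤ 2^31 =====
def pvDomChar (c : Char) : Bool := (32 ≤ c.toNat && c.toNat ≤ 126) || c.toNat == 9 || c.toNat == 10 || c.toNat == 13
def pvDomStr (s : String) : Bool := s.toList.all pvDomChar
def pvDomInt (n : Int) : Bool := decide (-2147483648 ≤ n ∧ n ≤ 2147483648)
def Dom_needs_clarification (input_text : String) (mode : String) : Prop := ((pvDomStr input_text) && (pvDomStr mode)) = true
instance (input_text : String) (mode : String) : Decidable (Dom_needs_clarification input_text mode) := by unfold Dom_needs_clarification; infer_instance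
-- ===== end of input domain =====

-- B replaces A's per-keyword substring scans with one left-to-right position scan of the lowered text
-- (startswith at each index, early exit on a specifics hit), a first-match rule search with staged early
-- returns instead of four copy-pasted branches, and drops the dead has_questions computation (objective: alternative).

-- ===== PORT A =====
def needs_clarification (input_text : String) (mode : String) : Bool × List String :=
  if input_text == "" || PySem.Str.len (PySem.Str.strip input_text) < 8 then
    (true, ["Could you provide more context about your request? I'd like to understand your objectives and constraints better."])
  else
    let word_count := (PySem.Str.split₀ (PySem.Str.strip input_text)).length
    let has_specifics := ["specifically", "exactly", "precisely", "particular", "detailed",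
        "because", "since", "due to", "according to", "based on"].any
        (fun keyword => PySem.Str.isIn keyword (PySem.Str.lower input_text))
    -- has_questions: dead computation kept for faithfulness; xs[-1] ported total via pyGetD (in range here: split₀ nonempty)
    let _has_questions := PySem.Str.isIn "?" input_text ||
        PySem.Str.isIn "?" (PySem.List.pyGetD (PySem.Str.split₀ input_text) (-1) "")
    if mode == "idea" then
      if (["idea", "have an idea", "thinking about", "concept", "maybe",
           "considering", "something like", "kind of", "sort of",
           "help me", "want to create", "looking for", "need help"].any
            (fun indicator => PySem.Str.isIn indicator (PySem.Str.lower input_text)))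
         && !has_specifics && word_count < 15 then
        (true, ["What specific problem or opportunity are you addressing?",
                "Who is your target audience or market segment?",
                "What makes your approach unique or different from existing solutions?",
                "What are your immediate goals or success criteria?"])
      else (false, [])
    else if mode == "script" then
      if (["script", "need a script", "write something", "presentation",
           "talk about", "discuss", "cover", "content", "material"].any
            (fun indicator => PySem.Str.isIn indicator (PySem.Str.lower input_text)))
         && !has_specifics && word_count < 20 then
        (true, ["What is the specific format or medium you need (video, podcast, presentation)?",
                "Who is your target audience and what do you want them to feel or think?",
                "What is the primary message or call to action?",
                "What tone or style would be most effective for your purpose?"])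
      else (false, [])
    else if mode == "brainstorm" then
      if (["brainstorm", "ideas", "think about", "explore", "generate",
           "come up with", "creative", "innovation", "solutions"].any
            (fun indicator => PySem.Str.isIn indicator (PySem.Str.lower input_text)))
         && !has_specifics && word_count < 25 then
        (true, ["What specific domain or industry would you like to focus on?",
                "Are there any constraints, boundaries, or requirements we should consider?",
                "What is the ultimate goal or outcome you're hoping to achieve?",
                "Who are the key stakeholders or perspectives we should include?"])
      else (false, [])
    else if mode == "prompt" then
      if (["prompt", "improve", "enhance", "better", "optimize",
           "ai prompt", "chatgpt", "llm prompt"].any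
            (fun indicator => PySem.Str.isIn indicator (PySem.Str.lower input_text)))
         && !has_specifics && word_count < 30 then
        (true, ["What specific task or use case will this prompt serve?",
                "What AI model or type of response are you targeting?",
                "What context, constraints, or guidelines should be included?",
                "Who is the intended audience for these AI-generated responses?"])
      else (false, [])
    else (false, [])

-- ===== PORT B =====
def pvSpecifics : List (List Char) :=
  ["specifically".toList, "exactly".toList, "precisely".toList, "particular".toList, "detailed".toList,
   "because".toList, "since".toList, "due to".toList, "according to".toList, "based on".toList]

-- _RULES: (mode, vague indicators, word-count threshold, suggested questions)
def pvRules : List (String × List (List Char) × Nat × List String) :=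
  [("idea",
    (["idea".toList, "have an idea".toList, "thinking about".toList, "concept".toList, "maybe".toList,
      "considering".toList, "something like".toList, "kind of".toList, "sort of".toList,
      "help me".toList, "want to create".toList, "looking for".toList, "need help".toList], 15,
     ["What specific problem or opportunity are you addressing?",
      "Who is your target audience or market segment?",
      "What makes your approach unique or different from existing solutions?",
      "What are your immediate goals or success criteria?"])),
   ("script",
    (["script".toList, "need a script".toList, "write something".toList, "presentation".toList,
      "talk about".toList, "discuss".toList, "cover".toList, "content".toList, "material".toList], 20,
     ["What is the specific format or medium you need (video, podcast, presentation)?",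
      "Who is your target audience and what do you want them to feel or think?",
      "What is the primary message or call to action?",
      "What tone or style would be most effective for your purpose?"])),
   ("brainstorm",
    (["brainstorm".toList, "ideas".toList, "think about".toList, "explore".toList, "generate".toList,
      "come up with".toList, "creative".toList, "innovation".toList, "solutions".toList], 25,
     ["What specific domain or industry would you like to focus on?",
      "Are there any constraints, boundaries, or requirements we should consider?",
      "What is the ultimate goal or outcome you're hoping to achieve?",
      "Who are the key stakeholders or perspectives we should include?"])),
   ("prompt",
    (["prompt".toList, "improve".toList, "enhance".toList, "better".toList, "optimize".toList,
      "ai prompt".toList, "chatgpt".toList, "llm prompt".toList], 30,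
     ["What specific task or use case will this prompt serve?",
      "What AI model or type of response are you targeting?",
      "What context, constraints, or guidelines should be included?",
      "Who is the intended audience for these AI-generated responses?"]))]

-- first rule whose mode matches (Python's for/break search over _RULES)
def pvFindRule (mode : String) : List (String × List (List Char) × Nat × List String) →
    Option (List (List Char) × Nat × List String)
  | [] => none
  | (m, r) :: rest => if m == mode then some r else pvFindRule mode rest

-- the position scan: walk the suffixes of the lowered text; `none` = a specifics keyword was seen
-- (Python's early `return False, []`), `some found` = whether an indicator started at some position
def pvScan (inds : List (List Char)) : List Char → Bool → Option Bool
  | [], found => some found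
  | c :: rest, found =>
    if pvSpecifics.any (fun k => PySem.Chars.startswith (c :: rest) k) then none
    else pvScan inds rest (found || inds.any (fun k => PySem.Chars.startswith (c :: rest) k))

def needs_clarification_alt (input_text : String) (mode : String) : Bool × List String :=
  if input_text == "" || PySem.Str.len (PySem.Str.strip input_text) < 8 then
    (true, ["Could you provide more context about your request? I'd like to understand your objectives and constraints better."])
  else
    match pvFindRule mode pvRules with
    | none => (false, [])
    | some (inds, thr, qs) =>
      if thr ≤ (PySem.Str.split₀ (PySem.Str.strip input_text)).length then (false, [])
      else
        match pvScan inds (PySem.Str.lower input_text).toList false with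
        | none => (false, [])
        | some true => (true, qs)
        | some false => (false, [])

-- ===== PRECONDITION & SPEC =====
def Spec_needs_clarification (input_text : String) (mode : String) (out : Bool × List String) : Prop := out = needs_clarification_alt input_text mode
instance (input_text : String) (mode : String) (out : Bool × List String) : Decidable (Spec_needs_clarification input_text mode out) := by unfold Spec_needs_clarification; infer_instance

-- ===== CLAIM =====
def Claim_equal_needs_clarification : Prop := ∀ (input_text : String) (mode : String), Dom_needs_clarification input_text mode → Spec_needs_clarification input_text mode (needs_clarification input_text mode)

-- ===== LEMMAS AND PROOFS =====

-- a nonempty pattern is an infix of c::rest iff it starts there or is an infix of rest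
theorem pvIsIn_cons (k : List Char) (hk : k ≠ []) (c : Char) (rest : List Char) :
    PySem.Chars.isIn k (c :: rest) = (PySem.Chars.startswith (c :: rest) k || PySem.Chars.isIn k rest) := by
  rcases h : PySem.Chars.startswith (c :: rest) k with _ | _
  · rcases h2 : PySem.Chars.isIn k rest with _ | _
    · simp only [Bool.or_false]
      rw [PySem.Chars.isIn_eq_false_iff]
      rw [PySem.Chars.isIn_eq_false_iff] at h2
      intro hinf
      rcases List.infix_cons_iff.mp hinf with hp | hi
      · rw [(PySem.Chars.startswith_iff _ _).mpr hp] at h; exact Bool.noConfusion h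
      · exact h2 hi
    · simp only [Bool.or_true]
      rw [PySem.Chars.isIn_iff_infix]
      rw [PySem.Chars.isIn_iff_infix] at h2
      exact List.infix_cons_iff.mpr (Or.inr h2)
  · simp only [Bool.true_or]
    rw [PySem.Chars.isIn_iff_infix]
    rw [PySem.Chars.startswith_iff] at h
    exact List.infix_cons_iff.mpr (Or.inl h)

theorem pvIsIn_nil (k : List Char) (hk : k ≠ []) : PySem.Chars.isIn k [] = false := by
  rw [PySem.Chars.isIn_eq_false_iff]
  intro hinf
  exact hk (List.eq_nil_of_infix_nil hinf)

-- lift pvIsIn_cons through List.any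
theorem pvAnyIsIn_cons (L : List (List Char)) (hL : ∀ k ∈ L, k ≠ []) (c : Char) (rest : List Char) :
    L.any (fun k => PySem.Chars.isIn k (c :: rest))
      = (L.any (fun k => PySem.Chars.startswith (c :: rest) k)
         || L.any (fun k => PySem.Chars.isIn k rest)) := by
  induction L with
  | nil => rfl
  | cons k L ih =>
    simp only [List.any_cons]
    rw [pvIsIn_cons k (hL k (List.mem_cons_self)) c rest,
        ih (fun x hx => hL x (List.mem_cons_of_mem k hx))]
    cases PySem.Chars.startswith (c :: rest) k <;> cases PySem.Chars.isIn k rest <;>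
      cases L.any (fun k => PySem.Chars.startswith (c :: rest) k) <;>
      cases L.any (fun k => PySem.Chars.isIn k rest) <;> rfl

theorem pvAnyIsIn_nil (L : List (List Char)) (hL : ∀ k ∈ L, k ≠ []) :
    L.any (fun k => PySem.Chars.isIn k ([] : List Char)) = false := by
  simp only [List.any_eq_false]
  intro k hk
  simp [pvIsIn_nil k (hL k hk)]

-- characterisation of the scan: early `none` iff some specifics keyword occurs; otherwise
-- `some (found || an indicator occurs)`
theorem pvScan_spec (inds : List (List Char)) (hinds : ∀ k ∈ inds, k ≠ [])
    (cs : List Char) (found : Bool) :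
    pvScan inds cs found =
      (if pvSpecifics.any (fun k => PySem.Chars.isIn k cs) then none
       else some (found || inds.any (fun k => PySem.Chars.isIn k cs))) := by
  induction cs generalizing found with
  | nil =>
    rw [pvAnyIsIn_nil pvSpecifics (by decide), pvAnyIsIn_nil inds hinds]
    simp [pvScan]
  | cons c rest ih =>
    rw [pvAnyIsIn_cons pvSpecifics (by decide) c rest, pvAnyIsIn_cons inds hinds c rest]
    simp only [pvScan]
    rcases h : pvSpecifics.any (fun k => PySem.Chars.startswith (c :: rest) k) with _ | _
    · simp only [Bool.false_eq_true, if_false, Bool.false_or]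
      rw [ih]
      rcases h2 : pvSpecifics.any (fun k => PySem.Chars.isIn k rest) with _ | _
      · simp only [Bool.false_eq_true, if_false, Option.some.injEq]
        cases found <;> cases inds.any (fun k => PySem.Chars.startswith (c :: rest) k) <;>
          cases inds.any (fun k => PySem.Chars.isIn k rest) <;> rfl
      · simp
    · simp

-- bridge: A's per-keyword String test equals the Chars infix test on .toList
theorem pvStrIsIn_eq (sub s : String) :
    PySem.Str.isIn sub s = PySem.Chars.isIn sub.toList s.toList := by
  rcases h : PySem.Chars.isIn sub.toList s.toList with _ | _
  · rw [← Bool.not_eq_true] at h ⊢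
    rw [PySem.Str.isIn_iff_infix]
    rw [PySem.Chars.isIn_iff_infix] at h
    exact h
  · exact (PySem.Str.isIn_iff_infix _ _).mpr ((PySem.Chars.isIn_iff_infix _ _).mp h)

-- A's any-over-Strings equals the any-over-Char-lists the scan talks about
theorem pvStrAny_eq (L : List String) (s : String) :
    L.any (fun k => PySem.Str.isIn k s)
      = (L.map String.toList).any (fun k => PySem.Chars.isIn k s.toList) := by
  induction L with
  | nil => rfl
  | cons k L ih =>
    simp only [List.any_cons, List.map, pvStrIsIn_eq] at ih ⊢
    rw [ih]

-- the common per-mode ending: A's one boolean conjunction vs B's staged early returns + scan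
theorem pvDecide (inds : List (List Char)) (hinds : ∀ k ∈ inds, k ≠ []) (cs : List Char)
    (wc thr : Nat) (qs : List String) :
    (if ((inds.any (fun k => PySem.Chars.isIn k cs))
          && !(pvSpecifics.any (fun k => PySem.Chars.isIn k cs))
          && decide (wc < thr)) = true then ((true : Bool), qs) else (false, ([] : List String)))
      = (if thr ≤ wc then (false, [])
         else match pvScan inds cs false with
              | none => (false, [])
              | some true => (true, qs)
              | some false => (false, [])) := by
  rw [pvScan_spec inds hinds]
  rcases hS : pvSpecifics.any (fun k => PySem.Chars.isIn k cs) with _ | _ <;>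
    rcases hI : inds.any (fun k => PySem.Chars.isIn k cs) with _ | _ <;>
      by_cases hwc : wc < thr <;>
        simp [hS, hI, hwc]

-- ===== VERDICT =====
theorem needs_clarification_spec : Claim_equal_needs_clarification := by
  intro input_text mode _
  unfold Spec_needs_clarification needs_clarification needs_clarification_alt
  by_cases hg : (input_text == "" || PySem.Str.len (PySem.Str.strip input_text) < 8) = true
  · simp only [hg, if_true]
  · simp only [Bool.not_eq_true] at hg
    simp only [hg, Bool.false_eq_true, if_false]
    by_cases h1 : mode = "idea"
    · subst h1
      simp only [pvFindRule, pvRules, beq_iff_eq, String.reduceEq, reduceIte, if_true]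
      rw [pvStrAny_eq, pvStrAny_eq]
      exact pvDecide _ (by decide) _ _ _ _
    · by_cases h2 : mode = "script"
      · subst h2
        simp only [pvFindRule, pvRules, beq_iff_eq, String.reduceEq, reduceIte, if_true]
        rw [pvStrAny_eq, pvStrAny_eq]
        exact pvDecide _ (by decide) _ _ _ _
      · by_cases h3 : mode = "brainstorm"
        · subst h3
          simp only [pvFindRule, pvRules, beq_iff_eq, String.reduceEq, reduceIte, if_true]
          rw [pvStrAny_eq, pvStrAny_eq]
          exact pvDecide _ (by decide) _ _ _ _
        · by_cases h4 : mode = "prompt"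
          · subst h4
            simp only [pvFindRule, pvRules, beq_iff_eq, String.reduceEq, reduceIte, if_true]
            rw [pvStrAny_eq, pvStrAny_eq]
            exact pvDecide _ (by decide) _ _ _ _
          · have b1 : ("idea" = mode) = False := by simp [Ne.symm h1]
            have b2 : ("script" = mode) = False := by simp [Ne.symm h2]
            have b3 : ("brainstorm" = mode) = False := by simp [Ne.symm h3]
            have b4 : ("prompt" = mode) = False := by simp [Ne.symm h4]
            simp [pvFindRule, pvRules, b1, b2, b3, b4, h1, h2, h3, h4]
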